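-- pv_equiv track=rewrite | github.com/abelaba/competitive-programming | week_10/cf_31vs32.py | howManyItTakes
-- ===== SOURCE A (Python) =====
-- def howManyItTakes(number, k):
--     count = 0
--     while number != k:
--         if number < k:
--             number += 4
--         elif number > k:
--             number -= 1
--         count += 1
--     return count
-- ===== SOURCE B (Python) =====
-- def howManyItTakes(number, k):
--     if number >= k:
--         return number - k
--     d = k - number
--     q = -(-d // 4)  # ceil(d / 4) upward +4 steps, then 4*q - d downward -1 steps
--     return 5 * q - d
-- ===== Notes on version B (the rewrite author's own statement) =====
-- stated objective: faster
-- what changed: Replaced the step-by-step +4/-1 simulation loop with closed-form arithmetic: q = ceil((k-number)/4) upward steps plus 4q-(k-number) downward steps, i.e. 5q-(k-number); number-k when number >= k.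
import Mathlib
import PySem

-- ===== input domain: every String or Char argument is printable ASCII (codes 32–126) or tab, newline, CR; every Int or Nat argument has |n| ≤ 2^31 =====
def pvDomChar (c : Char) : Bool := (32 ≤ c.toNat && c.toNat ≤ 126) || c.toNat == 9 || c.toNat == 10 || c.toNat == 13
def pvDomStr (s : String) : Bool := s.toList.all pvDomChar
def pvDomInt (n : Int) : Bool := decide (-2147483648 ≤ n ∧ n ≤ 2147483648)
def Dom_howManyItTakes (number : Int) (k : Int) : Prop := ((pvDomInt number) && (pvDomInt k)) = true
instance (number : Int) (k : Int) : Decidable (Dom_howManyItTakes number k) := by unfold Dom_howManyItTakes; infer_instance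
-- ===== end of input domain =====

-- B replaces A's step-by-step +4/-1 simulation loop by closed-form ceil-division arithmetic (objective: faster).

-- ===== PORT A =====
-- A's while loop always terminates: below k it gains 4 per step, above k it loses 1.
-- hmFuel bounds the number of iterations (used only as structural-recursion fuel to make the loop total).
def hmFuel (number k : Int) : Nat :=
  (if k ≤ number then number - k else 5 * ((k - number + 3) / 4) - (k - number)).toNat

-- A's while loop, transliterated: state (number, count); fuel is a termination guard only.
def hmLoop (fuel : Nat) (number k count : Int) : Int :=
  match fuel with
  | 0 => count
  | fuel + 1 =>
    if number = k then count
    else if number < k then hmLoop fuel (number + 4) k (count + 1)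
    else hmLoop fuel (number - 1) k (count + 1)

def howManyItTakes (number : Int) (k : Int) : Int := hmLoop (hmFuel number k) number k 0

-- ===== PORT B =====
def howManyItTakes_alt (number : Int) (k : Int) : Int :=
  if k ≤ number then number - k
  else
    let d := k - number
    let q := -(PySem.Int.floordiv (-d) 4)
    5 * q - d

-- ===== PRECONDITION & SPEC =====
def Spec_howManyItTakes (number : Int) (k : Int) (out : Int) : Prop := out = howManyItTakes_alt number k
instance (number : Int) (k : Int) (out : Int) : Decidable (Spec_howManyItTakes number k out) := by unfold Spec_howManyItTakes; infer_instance

-- ===== CLAIM (what is proved, stated in full; the proofs are below) =====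
def Claim_equal_howManyItTakes : Prop := ∀ (number : Int) (k : Int), Dom_howManyItTakes number k → Spec_howManyItTakes number k (howManyItTakes number k)

-- ===== LEMMAS AND PROOFS =====

-- closed form of B in plain ediv terms
theorem alt_eq (number k : Int) :
    howManyItTakes_alt number k =
      if k ≤ number then number - k
      else 5 * (-((number - k) / 4)) - (k - number) := by
  unfold howManyItTakes_alt
  split_ifs with h
  · rfl
  · have h4 : (0 : Int) < 4 := by norm_num
    simp only [PySem.Int.floordiv_eq_ediv_of_pos h4]
    have : -(k - number) = number - k := by ring
    rw [this]

-- loop invariant: with enough fuel the loop returns count plus B's closed form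
theorem hmLoop_eq (k : Int) : ∀ (fuel : Nat) (n c : Int), hmFuel n k ≤ fuel →
    hmLoop fuel n k c = c + howManyItTakes_alt n k := by
  intro fuel
  induction fuel with
  | zero =>
    intro n c h
    have hnk : n = k := by unfold hmFuel at h; omega
    subst hnk
    rw [hmLoop, alt_eq]
    simp
  | succ fuel ih =>
    intro n c h
    by_cases hnk : n = k
    · subst hnk
      rw [hmLoop, alt_eq]
      simp
    · by_cases hlt : n < k
      · rw [hmLoop]
        simp only [if_neg hnk, if_pos hlt]
        rw [ih (n + 4) (c + 1) (by unfold hmFuel at h ⊢; omega), alt_eq, alt_eq]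
        split_ifs with h1 h2 h2 <;> omega
      · rw [hmLoop]
        simp only [if_neg hnk, if_neg hlt]
        rw [ih (n - 1) (c + 1) (by unfold hmFuel at h ⊢; omega), alt_eq, alt_eq]
        split_ifs with h1 h2 h2 <;> omega

-- ===== VERDICT (by name: the statement is the Claim_ definition above) =====
theorem howManyItTakes_spec : Claim_equal_howManyItTakes := by
  intro number k _
  unfold Spec_howManyItTakes howManyItTakes
  rw [hmLoop_eq k (hmFuel number k) number 0 le_rfl]
  omega
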